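-- pv_equiv track=rewrite | github.com/jp1593/Roadmap | Python/Array+List/pairstwosum.py | pairValidation
-- ===== SOURCE A (Python) =====
-- def pairValidation(given_array, target):
--     function_array = given_array.copy()
--     array_result = []
--     base_number = 0
--     for i in range(len(function_array)):
--         base_number = function_array.pop(0)
--         for j in range(len(function_array)):
--             if base_number + function_array[j] == target and ([base_number, function_array[j]] not in array_result):
--                 array_result.append([base_number, function_array[j]])
--     return(array_result)
-- ===== SOURCE B (Python) =====
-- def pairValidation(given_array, target):
--     remaining = {}
--     for v in given_array:
--         remaining[v] = remaining.get(v, 0) + 1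
--     result = []
--     emitted = set()
--     for x in given_array:
--         remaining[x] -= 1
--         y = target - x
--         if remaining.get(y, 0) > 0 and (x, y) not in emitted:
--             emitted.add((x, y))
--             result.append([x, y])
--     return result
-- ===== Notes on version B (the rewrite author's own statement) =====
-- stated objective: faster
-- what changed: Replaced A's pop-the-head outer loop with an inner rescan plus an O(k) 'not in' dedup scan by a single pass that keeps a suffix-value count dict and a seen-set of emitted (x, target-x) pairs.
import Mathlib
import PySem

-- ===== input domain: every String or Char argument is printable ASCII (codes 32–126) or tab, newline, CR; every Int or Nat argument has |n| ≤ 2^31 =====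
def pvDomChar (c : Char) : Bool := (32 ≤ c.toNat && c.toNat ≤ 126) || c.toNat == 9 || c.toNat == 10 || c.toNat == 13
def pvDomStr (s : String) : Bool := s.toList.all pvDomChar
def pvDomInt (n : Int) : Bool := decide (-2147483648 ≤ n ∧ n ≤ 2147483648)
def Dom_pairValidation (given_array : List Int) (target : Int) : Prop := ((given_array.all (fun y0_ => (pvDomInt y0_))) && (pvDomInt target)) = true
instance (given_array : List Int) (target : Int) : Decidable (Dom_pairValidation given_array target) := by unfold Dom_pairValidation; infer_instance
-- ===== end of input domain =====

-- B replaces A's quadratic pop-and-rescan (with a linear 'not in' dedup scan) by one pass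
-- over the array with a suffix-count dict and a seen-set; return value only, no mutation claimed.

-- ===== PORT A =====
-- inner loop: for j in range(len(function_array)): append [base, fa[j]] if sum hits target and pair unseen
def pvInnerA (base target : Int) (fa : List Int) (res : List (List Int)) : List (List Int) :=
  fa.foldl (fun r y =>
    if base + y = target ∧ [base, y] ∉ r then r ++ [[base, y]] else r) res

-- outer loop: each iteration pops the head (base_number = function_array.pop(0)), then runs the inner loop
def pvOuterA (target : Int) : List Int → List (List Int) → List (List Int)
  | [], res => res
  | x :: rest, res => pvOuterA target rest (pvInnerA x target rest res)

def pairValidation (given_array : List Int) (target : Int) : List (List Int) :=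
  pvOuterA target given_array []

-- ===== PORT B =====
def pvAltGo (target : Int) : List Int → PySem.Dict Int Int → PySem.Set (Int × Int) → List (List Int) → List (List Int)
  | [], _, _, res => res
  | x :: rest, rem, em, res =>
    let rem' := rem.insert x (rem.getD x 0 - 1)   -- remaining[x] -= 1
    let y := target - x
    if rem'.getD y 0 > 0 ∧ (x, y) ∉ em then
      pvAltGo target rest rem' (PySem.Set.add em (x, y)) (res ++ [[x, y]])
    else
      pvAltGo target rest rem' em res

def pairValidation_alt (given_array : List Int) (target : Int) : List (List Int) :=
  let remaining := given_array.foldl (fun d v => d.insert v (d.getD v 0 + 1)) PySem.Dict.empty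
  pvAltGo target given_array remaining PySem.Set.empty []

-- ===== PRECONDITION & SPEC =====
def Spec_pairValidation (given_array : List Int) (target : Int) (out : List (List Int)) : Prop := out = pairValidation_alt given_array target
instance (given_array : List Int) (target : Int) (out : List (List Int)) : Decidable (Spec_pairValidation given_array target out) := by unfold Spec_pairValidation; infer_instance

-- ===== CLAIM (what is proved, stated in full; the proofs are below) =====
def Claim_equal_pairValidation : Prop := ∀ (given_array : List Int) (target : Int), Dom_pairValidation given_array target → Spec_pairValidation given_array target (pairValidation given_array target)

-- ===== LEMMAS AND PROOFS =====

-- A's inner loop never appends once the (unique possible) pair is already present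
theorem pvInnerA_of_mem (base target : Int) (fa : List Int) (res : List (List Int))
    (h : [base, target - base] ∈ res) : pvInnerA base target fa res = res := by
  induction fa generalizing res with
  | nil => rfl
  | cons z rest ih =>
    simp only [pvInnerA, List.foldl_cons] at *
    have hz : ¬ (base + z = target ∧ [base, z] ∉ res) := by
      rintro ⟨h1, h2⟩
      have : z = target - base := by omega
      exact h2 (this ▸ h)
    rw [if_neg hz]
    exact ih res h

-- closed form of A's inner loop
theorem pvInnerA_eq (base target : Int) (fa : List Int) (res : List (List Int)) :
    pvInnerA base target fa res =
      if (target - base) ∈ fa ∧ [base, target - base] ∉ res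
      then res ++ [[base, target - base]] else res := by
  induction fa generalizing res with
  | nil => simp [pvInnerA]
  | cons z rest ih =>
    simp only [pvInnerA, List.foldl_cons] at *
    by_cases hmem : [base, target - base] ∈ res
    · have hz : ¬ (base + z = target ∧ [base, z] ∉ res) := by
        rintro ⟨h1, h2⟩
        have : z = target - base := by omega
        exact h2 (this ▸ hmem)
      rw [if_neg hz]
      rw [show (rest.foldl (fun r y => if base + y = target ∧ [base, y] ∉ r then r ++ [[base, y]] else r) res) = pvInnerA base target rest res from rfl,
          pvInnerA_of_mem base target rest res hmem]
      simp [hmem]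
    · by_cases hz : z = target - base
      · subst hz
        have hcond : base + (target - base) = target ∧ [base, target - base] ∉ res := ⟨by ring, hmem⟩
        rw [if_pos hcond]
        rw [show (rest.foldl (fun r y => if base + y = target ∧ [base, y] ∉ r then r ++ [[base, y]] else r) (res ++ [[base, target - base]])) = pvInnerA base target rest (res ++ [[base, target - base]]) from rfl,
            pvInnerA_of_mem base target rest _ (by simp)]
        simp [hmem]
      · have hcond : ¬ (base + z = target ∧ [base, z] ∉ res) := by
          rintro ⟨h1, _⟩; exact hz (by omega)
        rw [if_neg hcond, ih res]
        have : ((target - base) ∈ z :: rest) ↔ ((target - base) ∈ rest) := by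
          simp [Ne.symm hz]
        simp only [this]

-- main invariant: B's loop with suffix counts and seen-set tracks A's pop-and-rescan loop
theorem pvAltGo_eq (target : Int) (fa : List Int) (rem : PySem.Dict Int Int)
    (em : PySem.Set (Int × Int)) (res : List (List Int))
    (hrem : ∀ v, rem.getD v 0 = fa.count v)
    (hem : ∀ a b : Int, (a, b) ∈ em ↔ [a, b] ∈ res) :
    pvAltGo target fa rem em res = pvOuterA target fa res := by
  induction fa generalizing rem em res with
  | nil => rfl
  | cons x rest ih =>
    simp only [pvAltGo, pvOuterA]
    have hcount : ∀ v, (rem.insert x (rem.getD x 0 - 1)).getD v 0 = rest.count v := by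
      intro v
      rw [PySem.Dict.getD_insert]
      by_cases hv : v = x
      · subst hv; rw [if_pos rfl, hrem v]; simp
      · rw [if_neg hv, hrem v]
        simp [Ne.symm hv]
    have hcond : ((rem.insert x (rem.getD x 0 - 1)).getD (target - x) 0 > 0 ∧
        (x, target - x) ∉ em) ↔ ((target - x) ∈ rest ∧ [x, target - x] ∉ res) := by
      rw [hcount, hem]
      constructor
      · rintro ⟨h1, h2⟩
        exact ⟨List.count_pos_iff.mp (by exact_mod_cast h1), h2⟩
      · rintro ⟨h1, h2⟩
        exact ⟨by exact_mod_cast List.count_pos_iff.mpr h1, h2⟩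
    rw [pvInnerA_eq]
    by_cases hc : (target - x) ∈ rest ∧ [x, target - x] ∉ res
    · rw [if_pos (hcond.mpr hc), if_pos hc]
      apply ih _ _ _ hcount
      intro a b
      rw [PySem.Set.mem_add, hem]
      constructor
      · rintro (h | h)
        · simp [h]
        · obtain ⟨rfl, rfl⟩ : a = x ∧ b = target - x := by
            have := Prod.mk.injEq a b x (target - x) ▸ h
            exact ⟨congrArg Prod.fst h, congrArg Prod.snd h⟩
          simp
      · intro h
        rcases List.mem_append.mp h with h | h
        · exact Or.inl h
        · right
          simp at h
          simp [h]
    · rw [if_neg (fun h => hc (hcond.mp h)), if_neg hc]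
      exact ih _ _ _ hcount hem

-- ===== VERDICT (by name: the statement is the Claim_ definition above) =====
theorem pairValidation_spec : Claim_equal_pairValidation := by
  intro given_array target _
  unfold Spec_pairValidation pairValidation pairValidation_alt
  rw [pvAltGo_eq]
  · intro v
    rw [show (given_array.foldl (fun d v => d.insert v (d.getD v 0 + 1)) PySem.Dict.empty) = PySem.Dict.counter given_array from PySem.Dict.foldl_insert_getD_add_one_eq_counter given_array]
    exact PySem.Dict.getD_counter given_array v
  · intro a b; simp [PySem.Set.empty]
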